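-- pv_equiv track=rewrite | github.com/956MB/Kata | 6kyu/Sort_columns_of_csv-file/cols.py | sort_csv_columns
-- ===== SOURCE A (Python) =====
-- def sort_csv_columns(csv_file_content):
--     out, temp = [], []
--     ret = [i.split(';') for i in csv_file_content.split('\n')]
--     ret = [list(x) for x in sorted(zip(*ret), key=lambda v: v[0].upper())]
--     for i in range(len(ret[0])):
--         for x in range(len(ret)):
--             temp.append(ret[x][i])
--         out.append(';'.join(temp))
--         temp = []
--     return '\n'.join(out)
-- ===== SOURCE B (Python) =====
-- def sort_csv_columns(csv_file_content):
--     rows = [line.split(';') for line in csv_file_content.split('\n')]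
--     ncols = min(len(r) for r in rows)
--     header = rows[0]
--     order = sorted(range(ncols), key=lambda i: header[i].upper())
--     return '\n'.join(';'.join(row[i] for i in order) for row in rows)
-- ===== Notes on version B (the rewrite author's own statement) =====
-- stated objective: idiomatic
-- what changed: B never transposes the grid: it sorts a single column-index permutation by uppercased header once, then emits each row by gathering its cells in that order, instead of A's zip-transpose, sort whole columns, then transpose back with nested loops.
import Mathlib
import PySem

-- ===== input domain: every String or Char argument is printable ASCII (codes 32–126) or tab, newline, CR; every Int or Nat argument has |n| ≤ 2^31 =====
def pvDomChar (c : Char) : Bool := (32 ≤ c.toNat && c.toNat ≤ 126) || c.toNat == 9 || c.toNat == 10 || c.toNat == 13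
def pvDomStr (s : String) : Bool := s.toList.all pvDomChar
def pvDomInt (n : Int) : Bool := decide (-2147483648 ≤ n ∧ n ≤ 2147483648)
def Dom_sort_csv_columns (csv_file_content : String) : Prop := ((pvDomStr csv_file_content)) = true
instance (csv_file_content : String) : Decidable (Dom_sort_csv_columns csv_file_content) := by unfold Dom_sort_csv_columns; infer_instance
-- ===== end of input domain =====

-- B sorts one column-index permutation by uppercased header and gathers cells per row,
-- instead of A's transpose / sort-the-columns / transpose-back; objective: idiomatic (no speed claim).

-- shared primitive: s.split(sep) for a nonempty literal sep (exact: PySem.Str.split? is none only for sep = "")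
def pySplit (s sep : String) : List String := (PySem.Str.split? s sep).getD []

-- ===== PORT A =====
-- zip(*rows): truncating transpose, as Python's zip of the row iterators
def pyZipHeads {α : Type} : List (List α) → Option (List α × List (List α))
  | [] => some ([], [])
  | [] :: _ => none
  | (x :: xs) :: rs => (pyZipHeads rs).map (fun p => (x :: p.1, xs :: p.2))

def pyZipGo {α : Type} : List α → List (List α) → List (List α)
  | [], _ => []
  | x :: r0, rs =>
      match pyZipHeads rs with
      | some p => (x :: p.1) :: pyZipGo r0 p.2
      | none => []

def pyZipStar {α : Type} : List (List α) → List (List α)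
  | [] => []
  | r0 :: rs => pyZipGo r0 rs

def sort_csv_columns (csv_file_content : String) : String :=
  let ret := (pySplit csv_file_content "\n").map (fun i => pySplit i ";")
  let ret2 := PySem.List.sorted (pyZipStar ret)
      (fun v => PySem.Str.upper (PySem.List.pyGetD v 0 "")) false
  let out := (PySem.List.pyRange 0 (PySem.List.len (PySem.List.pyGetD ret2 0 [])) 1).foldl
      (fun out i =>
        let temp := (PySem.List.pyRange 0 (PySem.List.len ret2) 1).foldl
          (fun temp x => temp ++ [PySem.List.pyGetD (PySem.List.pyGetD ret2 x []) i ""]) []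
        out ++ [PySem.Str.join ";" temp]) []
  PySem.Str.join "\n" out

-- ===== PORT B =====
def sort_csv_columns_alt (csv_file_content : String) : String :=
  let rows := (pySplit csv_file_content "\n").map (fun line => pySplit line ";")
  let ncols := (PySem.List.min? (rows.map (fun r => (r.length : Int))) (fun v => v)).getD 0
  let header := PySem.List.pyGetD rows 0 []
  let order := PySem.List.sorted (PySem.List.pyRange 0 ncols 1)
      (fun i => PySem.Str.upper (PySem.List.pyGetD header i "")) false
  PySem.Str.join "\n"
    (rows.map (fun row => PySem.Str.join ";" (order.map (fun i => PySem.List.pyGetD row i ""))))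

-- ===== PRECONDITION & SPEC =====
def Spec_sort_csv_columns (csv_file_content : String) (out : String) : Prop := out = sort_csv_columns_alt csv_file_content
instance (csv_file_content : String) (out : String) : Decidable (Spec_sort_csv_columns csv_file_content out) := by unfold Spec_sort_csv_columns; infer_instance

-- ===== CLAIM (what is proved, stated in full; the proofs are below) =====
def Claim_equal_sort_csv_columns : Prop := ∀ (csv_file_content : String), Dom_sort_csv_columns csv_file_content → Spec_sort_csv_columns csv_file_content (sort_csv_columns csv_file_content)

-- ===== LEMMAS AND PROOFS =====

lemma splitOn_go_ne_nil (sep : List Char) : ∀ (fuel : Nat) (l cur : List Char) (acc : List (List Char)), PySem.Chars.splitOn.go sep fuel l cur acc ≠ [] := by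
  intro fuel
  induction fuel with
  | zero => intro l cur acc; simp [PySem.Chars.splitOn.go]
  | succ n ih =>
    intro l cur acc
    cases l with
    | nil => simp [PySem.Chars.splitOn.go]
    | cons c rest =>
      simp only [PySem.Chars.splitOn.go]
      split
      · exact ih _ _ _
      · exact ih _ _ _

lemma pySplit_ne_nil (s sep : String) (h : sep.toList ≠ []) : pySplit s sep ≠ [] := by
  simp [pySplit, PySem.Str.split?, PySem.Chars.split?, List.isEmpty_iff, h, PySem.Chars.splitOn]
  exact splitOn_go_ne_nil _ _ _ _ _

lemma pyZipHeads_eq {α : Type} (d : α) (rs : List (List α)) (h : ∀ r ∈ rs, r ≠ []) :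
    pyZipHeads rs = some (rs.map (fun r => r.getD 0 d), rs.map List.tail) := by
  induction rs with
  | nil => rfl
  | cons r rs ih =>
    cases r with
    | nil => exact absurd rfl (h [] (by simp))
    | cons x xs =>
      simp only [pyZipHeads, ih (fun r hr => h r (by simp [hr])), Option.map_some]
      simp

lemma pyZipHeads_none {α : Type} (rs : List (List α)) (h : [] ∈ rs) : pyZipHeads rs = none := by
  induction rs with
  | nil => simp at h
  | cons r rs ih =>
    cases r with
    | nil => rfl
    | cons x xs =>
      rcases List.mem_cons.1 h with h | h
      · exact absurd h.symm (by simp)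
      · simp [pyZipHeads, ih h]

def minl {α : Type} (a : Nat) (rs : List (List α)) : Nat := rs.foldl (fun m r => min m r.length) a

lemma minl_le {α : Type} (rs : List (List α)) : ∀ a, minl a rs ≤ a := by
  induction rs with
  | nil => intro a; simp [minl]
  | cons r rs ih =>
    intro a
    calc minl a (r :: rs) = minl (min a r.length) rs := rfl
    _ ≤ min a r.length := ih _
    _ ≤ a := Nat.min_le_left _ _

lemma minl_zero {α : Type} (rs : List (List α)) : minl 0 rs = 0 :=
  Nat.le_zero.1 (minl_le rs 0)

lemma minl_eq_zero_of_mem {α : Type} (rs : List (List α)) (h : [] ∈ rs) (a : Nat) : minl a rs = 0 := by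
  induction rs generalizing a with
  | nil => simp at h
  | cons r rs ih =>
    rcases List.mem_cons.1 h with h | h
    · subst h
      show minl (min a 0) rs = 0
      simp [minl_zero]
    · exact ih h _

lemma minl_succ {α : Type} (rs : List (List α)) (h : ∀ r ∈ rs, r ≠ []) :
    ∀ a, minl (a + 1) rs = minl a (rs.map List.tail) + 1 := by
  induction rs with
  | nil => intro a; simp [minl]
  | cons r rs ih =>
    intro a
    cases r with
    | nil => exact absurd rfl (h [] (by simp))
    | cons x xs =>
      show minl (min (a+1) (xs.length+1)) rs = minl (min a xs.length) (rs.map List.tail) + 1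
      rw [Nat.succ_min_succ]
      exact ih (fun r hr => h r (by simp [hr])) _

lemma minl_pos {α : Type} (rs : List (List α)) (h : ∀ r ∈ rs, r ≠ []) :
    ∀ a, 0 < a → 0 < minl a rs := by
  induction rs with
  | nil => intro a ha; simpa [minl] using ha
  | cons r rs ih =>
    intro a ha
    refine ih (fun r hr => h r (by simp [hr])) _ ?_
    have : r ≠ [] := h r (by simp)
    have : 0 < r.length := List.length_pos_iff.2 this
    exact lt_min ha this

lemma pyZipGo_spec {α : Type} (d : α) : ∀ (r0 : List α) (rs : List (List α)),
    pyZipGo r0 rs = (List.range (minl r0.length rs)).map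
      (fun i => r0.getD i d :: rs.map (fun r => r.getD i d)) := by
  intro r0
  induction r0 with
  | nil => intro rs; simp [pyZipGo, minl_zero]
  | cons x r0 ih =>
    intro rs
    by_cases h : ∀ r ∈ rs, r ≠ []
    · rw [show pyZipGo (x :: r0) rs = (x :: rs.map (fun r => r.getD 0 d)) :: pyZipGo r0 (rs.map List.tail) by
        simp [pyZipGo, pyZipHeads_eq d rs h]]
      rw [ih]
      have hlen : (x :: r0).length = r0.length + 1 := rfl
      rw [hlen, minl_succ rs h, List.range_succ_eq_map, List.map_cons, List.map_map]
      simp only [List.getD_cons_zero, Function.comp_def, List.getD_cons_succ, List.map_map]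
      congr 1
      apply List.map_congr_left
      intro i _
      congr 1
      apply List.map_congr_left
      intro r hr
      cases r <;> rfl
    · push Not at h
      obtain ⟨r, hr, hr0⟩ := h
      rw [show pyZipGo (x :: r0) rs = [] by
        simp [pyZipGo, pyZipHeads_none rs (hr0 ▸ hr)]]
      rw [show (x :: r0).length = r0.length + 1 from rfl, minl_eq_zero_of_mem rs (hr0 ▸ hr)]
      simp

lemma foldl_push {α β : Type} (g : α → β) : ∀ (xs : List α) (acc : List β),
    xs.foldl (fun a x => a ++ [g x]) acc = acc ++ xs.map g := by
  intro xs
  induction xs with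
  | nil => intro acc; simp
  | cons x xs ih => intro acc; simp [ih]

lemma insertBy_map {α β κ : Type} [LT κ] [DecidableLT κ] (f : α → β) (key : β → κ) :
    ∀ (ys : List α) (x : α),
    PySem.List.insertBy (fun a b => decide (key a < key b)) (f x) (ys.map f)
      = (PySem.List.insertBy (fun a b => decide (key (f a) < key (f b))) x ys).map f := by
  intro ys
  induction ys with
  | nil => intro x; rfl
  | cons y ys ih =>
    intro x
    simp only [List.map_cons, PySem.List.insertBy]
    split_ifs with hb
    · simp
    · simp [ih]

lemma sorted_map {α β κ : Type} [LT κ] [DecidableLT κ] (f : α → β) (key : β → κ) (xs : List α) :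
    PySem.List.sorted (xs.map f) key false
      = (PySem.List.sorted xs (fun x => key (f x)) false).map f := by
  rw [PySem.List.sorted_eq_foldl_insertBy, PySem.List.sorted_eq_foldl_insertBy]
  suffices h : ∀ (xs : List α) (acc : List α),
      (xs.map f).foldl (fun acc y => PySem.List.insertBy (fun a b => decide (key a < key b)) y acc) (acc.map f)
        = (xs.foldl (fun acc x => PySem.List.insertBy (fun a b => decide (key (f a) < key (f b))) x acc) acc).map f by
    simpa using h xs []
  intro xs
  induction xs with
  | nil => intro acc; rfl
  | cons x xs ih =>
    intro acc
    simp only [List.map_cons, List.foldl_cons]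
    rw [insertBy_map f key acc x, ih]

lemma foldl_min_step (g : Option Int → Int → Option Int)
    (hg : ∀ m y, g (some m) y = some (min m y)) :
    ∀ (xs : List Int) (m : Int), xs.foldl g (some m) = some (xs.foldl min m) := by
  intro xs
  induction xs with
  | nil => intro m; rfl
  | cons y ys ih => intro m; simp only [List.foldl_cons, hg]; exact ih _

lemma min?_int_cons (x : Int) (xs : List Int) :
    PySem.List.min? (x :: xs) (fun v => v) = some (xs.foldl min x) := by
  simp only [PySem.List.min?, List.foldl_cons]
  refine foldl_min_step _ ?_ xs x
  intro m y
  rcases lt_or_ge y m with h | h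
  · simp [h]
    omega
  · simp [not_lt.2 h]
    omega

lemma cast_minl {α : Type} : ∀ (rs : List (List α)) (a : Nat),
    ((minl a rs : Nat) : Int) = (rs.map (fun r => (r.length : Int))).foldl min (a : Int) := by
  intro rs
  induction rs with
  | nil => intro a; simp [minl]
  | cons r rs ih =>
    intro a
    show ((minl (min a r.length) rs : Nat) : Int) = _
    simp only [List.map_cons, List.foldl_cons]
    rw [ih]
    congr 1
    push_cast
    rfl

lemma pyRange_cast (n : Nat) : PySem.List.pyRange 0 (n : Int) 1 = (List.range n).map (Nat.cast : Nat → Int) := by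
  rw [PySem.List.pyRange_one]
  simp only [zero_add, Int.sub_zero, Int.toNat_natCast]

lemma map_getD_all (xs : List (List String)) (i : Int) :
    (PySem.List.pyRange 0 (PySem.List.len xs) 1).map
        (fun x => PySem.List.pyGetD (PySem.List.pyGetD xs x []) i "")
      = xs.map (fun c => PySem.List.pyGetD c i "") := by
  calc (PySem.List.pyRange 0 (PySem.List.len xs) 1).map
        (fun x => PySem.List.pyGetD (PySem.List.pyGetD xs x []) i "")
      = ((PySem.List.pyRange 0 (PySem.List.len xs) 1).map
          (fun x => PySem.List.pyGetD xs x [])).map (fun c => PySem.List.pyGetD c i "") := by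
        rw [List.map_map]
        rfl
    _ = xs.map (fun c => PySem.List.pyGetD c i "") := by
        rw [PySem.List.map_pyGetD_pyRange_zero]

lemma core (rows : List (List String)) (hne : rows ≠ []) (hall : ∀ r ∈ rows, r ≠ []) :
    (let ret2 := PySem.List.sorted (pyZipStar rows)
        (fun v => PySem.Str.upper (PySem.List.pyGetD v 0 "")) false
     let out := (PySem.List.pyRange 0 (PySem.List.len (PySem.List.pyGetD ret2 0 [])) 1).foldl
        (fun out i =>
          let temp := (PySem.List.pyRange 0 (PySem.List.len ret2) 1).foldl
            (fun temp x => temp ++ [PySem.List.pyGetD (PySem.List.pyGetD ret2 x []) i ""]) []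
          out ++ [PySem.Str.join ";" temp]) []
     PySem.Str.join "\n" out)
    =
    (let ncols := (PySem.List.min? (rows.map (fun r => (r.length : Int))) (fun v => v)).getD 0
     let header := PySem.List.pyGetD rows 0 []
     let order := PySem.List.sorted (PySem.List.pyRange 0 ncols 1)
        (fun i => PySem.Str.upper (PySem.List.pyGetD header i "")) false
     PySem.Str.join "\n" (rows.map (fun row => PySem.Str.join ";" (order.map (fun i => PySem.List.pyGetD row i ""))))) := by
  obtain ⟨row0, rows', rfl⟩ : ∃ a l, rows = a :: l := by
    cases rows with
    | nil => exact absurd rfl hne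
    | cons a l => exact ⟨a, l, rfl⟩
  dsimp only
  have hrow0 : row0 ≠ [] := hall _ (by simp)
  have hall' : ∀ r ∈ rows', r ≠ [] := fun r hr => hall r (by simp [hr])
  set n : Nat := minl row0.length rows' with hn
  have hnpos : 0 < n := minl_pos rows' hall' _ (List.length_pos_iff.2 hrow0)
  set C : Nat → List String := fun i => (row0 :: rows').map (fun r => r.getD i "") with hC
  set keyN : Nat → String := fun i => PySem.Str.upper (row0.getD i "") with hkeyN
  set P : List Nat := PySem.List.sorted (List.range n) keyN false with hP
  have hPlen : P.length = n := by rw [hP, PySem.List.length_sorted, List.length_range]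
  -- zip(*rows) is the list of the first n columns
  have hzip : pyZipStar (row0 :: rows') = (List.range n).map C := by
    show pyZipGo row0 rows' = _
    rw [pyZipGo_spec "", ← hn]
    simp [hC]
  -- sorting the columns = sorting the column indices, then reading the columns off
  have hsorted : PySem.List.sorted (pyZipStar (row0 :: rows'))
      (fun v => PySem.Str.upper (PySem.List.pyGetD v 0 "")) false = P.map C := by
    rw [hzip, sorted_map C (fun v => PySem.Str.upper (PySem.List.pyGetD v 0 ""))]
    have hk : (fun x => PySem.Str.upper (PySem.List.pyGetD (C x) 0 "")) = keyN := by
      funext i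
      simp [hC, hkeyN, PySem.List.pyGetD_ofNat']
    rw [hk, hP]
  have hPne : P ≠ [] := by
    intro h
    rw [h] at hPlen
    simp at hPlen
    omega
  obtain ⟨j0, P', hPcons⟩ := List.exists_cons_of_ne_nil hPne
  have h0 : PySem.List.pyGetD (P.map C) 0 [] = C j0 := by
    rw [hPcons]
    simp [PySem.List.pyGetD_ofNat']
  have hlen0 : PySem.List.len (C j0) = ((rows'.length + 1 : Nat) : Int) := by
    simp [PySem.List.len_eq, hC]
  have hncols : (PySem.List.min? ((row0 :: rows').map (fun r => (r.length : Int))) (fun v => v)).getD 0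
      = (n : Int) := by
    simp only [List.map_cons]
    rw [min?_int_cons]
    simp only [Option.getD_some]
    rw [hn, cast_minl]
  have hheader : PySem.List.pyGetD (row0 :: rows') 0 ([] : List String) = row0 := by
    simp [PySem.List.pyGetD_ofNat']
  have horder : PySem.List.sorted (PySem.List.pyRange 0 ((n : Int)) 1)
      (fun i => PySem.Str.upper (PySem.List.pyGetD row0 i "")) false
      = P.map (Nat.cast : Nat → Int) := by
    rw [pyRange_cast, sorted_map]
    have hk2 : (fun x : Nat => PySem.Str.upper (PySem.List.pyGetD row0 ((x : Nat) : Int) "")) = keyN := by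
      funext i
      simp [hkeyN, PySem.List.pyGetD_natCast]
    rw [hk2, hP]
  rw [hsorted, hncols, hheader, horder, h0, hlen0, pyRange_cast]
  simp only [foldl_push, List.nil_append, map_getD_all, List.map_map]
  congr 1
  apply List.ext_getElem
  · simp
  · intro k h1 h2
    simp only [List.getElem_map, List.getElem_range, Function.comp_apply]
    congr 1
    apply List.map_congr_left
    intro j hj
    simp only [Function.comp_apply, PySem.List.pyGetD_natCast, hC]
    have hk : k < (row0 :: rows').length := by simpa using h2
    have hk' : k < (List.map (fun r => r.getD j "") (row0 :: rows')).length := by simpa using hk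
    rw [List.getD_eq_getElem _ _ hk', List.getElem_map]

-- ===== VERDICT (by name: the statement is the Claim_ definition above) =====
theorem sort_csv_columns_spec : Claim_equal_sort_csv_columns := by
  intro csv _
  unfold Spec_sort_csv_columns sort_csv_columns sort_csv_columns_alt
  exact core ((pySplit csv "\n").map (fun i => pySplit i ";"))
    (by
      simp only [ne_eq, List.map_eq_nil_iff]
      exact pySplit_ne_nil csv "\n" (by decide))
    (by
      intro r hr
      obtain ⟨l, _, rfl⟩ := List.mem_map.1 hr
      exact pySplit_ne_nil l ";" (by decide))
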